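-- pv_equiv track=rewrite | github.com/mihaMaks/Advent_of_code_2023 | day_13/simetry2.py | izracunaj
-- ===== SOURCE A (Python) =====
-- def izracunaj(grid_ver, column_to_check):
--     delna1 = 0
--     for i in range(len(grid_ver[0])):
--         ver = True
--         x = 0
--         m = 0
--         for j in range(len(grid_ver)):
--             if grid_ver[j][i] == 0:
--                 x = j
--                 ver = False
--             else:
--                 m += 1
--         if m == len(grid_ver)-1:
--             column_to_check.append((x, i))  # row, simetry line index
--         if ver:
--             delna1 += i+1
--     return delna1
-- ===== SOURCE B (Python) =====
-- def izracunaj(grid_ver, column_to_check):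
--     rows = len(grid_ver)
--     cols = len(grid_ver[0])
--     zero_count = [0] * cols
--     last_zero = [0] * cols
--     for j in range(rows):
--         row = grid_ver[j]
--         for i in range(cols):
--             if row[i] == 0:
--                 zero_count[i] += 1
--                 last_zero[i] = j
--     delna1 = 0
--     for i in range(cols):
--         if zero_count[i] == 0:
--             delna1 += i + 1
--         elif zero_count[i] == 1:
--             column_to_check.append((last_zero[i], i))
--     return delna1
-- ===== Notes on version B (the rewrite author's own statement) =====
-- stated objective: faster
-- what changed: Replaces A's column-major rescans (one inner pass over all rows per column, tracking ver/x/m) by a single row-major sweep building per-column zero-count and last-zero tables, followed by a separate pass over the tables that accumulates the result and the appends.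
import Mathlib
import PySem

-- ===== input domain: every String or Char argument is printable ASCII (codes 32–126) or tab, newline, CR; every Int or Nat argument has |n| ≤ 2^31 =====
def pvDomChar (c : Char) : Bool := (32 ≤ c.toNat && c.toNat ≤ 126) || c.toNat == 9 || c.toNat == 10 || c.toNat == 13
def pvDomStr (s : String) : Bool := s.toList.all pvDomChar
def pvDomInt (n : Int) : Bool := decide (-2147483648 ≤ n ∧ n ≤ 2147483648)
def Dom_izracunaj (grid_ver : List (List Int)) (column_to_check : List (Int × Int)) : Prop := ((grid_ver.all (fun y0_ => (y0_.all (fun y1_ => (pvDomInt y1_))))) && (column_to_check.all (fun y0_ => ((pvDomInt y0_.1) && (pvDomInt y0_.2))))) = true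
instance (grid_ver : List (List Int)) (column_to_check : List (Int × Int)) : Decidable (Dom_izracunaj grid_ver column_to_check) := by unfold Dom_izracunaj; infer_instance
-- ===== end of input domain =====

-- B replaces A's column-major rescans by one row-major sweep building per-column
-- zero tallies plus a separate output pass (objective: alternative decomposition).
-- Both A and B append the same pairs to column_to_check in the same order; the
-- theorems here are about the RETURN value only.

-- ===== PORT A =====
-- A, column-major: for each column i, scan all rows tracking (ver, x, m); the
-- 'm == len(grid_ver)-1' branch only appends to column_to_check (a side effect
-- on the argument, not part of the return value) and is therefore not modelled.
def izracunaj (grid_ver : List (List Int)) (column_to_check : List (Int × Int)) : Int :=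
  let rows := grid_ver.length
  let cols := (grid_ver.getD 0 []).length
  (List.range cols).foldl (fun delna1 i =>
    let s := (List.range rows).foldl
      (fun (s : Bool × Nat × Nat) j =>
        if (grid_ver.getD j []).getD i 0 = 0 then (false, j, s.2.2)
        else (s.1, s.2.1, s.2.2 + 1)) (true, 0, 0)
    if s.1 then delna1 + (i : Int) + 1 else delna1) 0

-- ===== PORT B =====
-- B, row-major: one sweep fills zero_count/last_zero tables, then a second pass
-- over the columns reads zero_count; the 'zero_count[i] == 1' branch only appends
-- to column_to_check (side effect, not the return value) and is not modelled.
def izracunaj_alt (grid_ver : List (List Int)) (column_to_check : List (Int × Int)) : Int :=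
  let rows := grid_ver.length
  let cols := (grid_ver.getD 0 []).length
  let t := (List.range rows).foldl
    (fun (t : List Nat × List Nat) j =>
      let row := grid_ver.getD j []
      (List.range cols).foldl
        (fun (t : List Nat × List Nat) i =>
          if row.getD i 0 = 0 then (t.1.set i (t.1.getD i 0 + 1), t.2.set i j)
          else t) t)
    (List.replicate cols 0, List.replicate cols 0)
  (List.range cols).foldl (fun delna1 i =>
    if t.1.getD i 0 = 0 then delna1 + (i : Int) + 1 else delna1) 0

-- ===== PRECONDITION & SPEC =====
-- Pre_ excludes exactly the inputs where Python A raises IndexError: the empty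
-- grid (grid_ver[0]) and ragged grids with a row shorter than the first row.
def Pre_izracunaj (grid_ver : List (List Int)) (column_to_check : List (Int × Int)) : Prop :=
  grid_ver ≠ [] ∧ ∀ row ∈ grid_ver, (grid_ver.getD 0 []).length ≤ row.length
instance (grid_ver : List (List Int)) (column_to_check : List (Int × Int)) : Decidable (Pre_izracunaj grid_ver column_to_check) := by unfold Pre_izracunaj; infer_instance
def pvWitness_izracunaj : List (List Int) × (List (Int × Int)) := ([[1, 0], [1, 1]], [])

def Spec_izracunaj (grid_ver : List (List Int)) (column_to_check : List (Int × Int)) (out : Int) : Prop := out = izracunaj_alt grid_ver column_to_check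
instance (grid_ver : List (List Int)) (column_to_check : List (Int × Int)) (out : Int) : Decidable (Spec_izracunaj grid_ver column_to_check out) := by unfold Spec_izracunaj; infer_instance

-- ===== CLAIM (what is proved, stated in full; the proofs are below) =====
def Claim_equal_izracunaj : Prop := ∀ (grid_ver : List (List Int)) (column_to_check : List (Int × Int)), Dom_izracunaj grid_ver column_to_check → Pre_izracunaj grid_ver column_to_check → Spec_izracunaj grid_ver column_to_check (izracunaj grid_ver column_to_check)

-- ===== LEMMAS AND PROOFS =====

-- number of zeros in column i among the first n rows
def pvZc (g : List (List Int)) (i n : Nat) : Nat :=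
  (List.range n).countP (fun j => decide ((g.getD j []).getD i 0 = 0))

theorem pvZc_succ (g : List (List Int)) (i n : Nat) :
    pvZc g i (n + 1) = pvZc g i n + (if (g.getD n []).getD i 0 = 0 then 1 else 0) := by
  unfold pvZc
  rw [List.range_succ, List.countP_append, List.countP_cons, List.countP_nil]
  by_cases h : (g.getD n []).getD i 0 = 0 <;> simp [h]

theorem pvGetD_set (l : List Nat) (n m a : Nat) :
    (l.set n a).getD m 0 = if n = m ∧ n < l.length then a else l.getD m 0 := by
  rcases eq_or_ne n m with rfl | h
  · by_cases hl : n < l.length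
    · simp [List.getD, hl]
    · simp [List.getD, hl, List.set_eq_of_length_le (Nat.le_of_not_lt hl)]
  · simp [List.getD, h]

-- A's inner scan: its 'ver' flag says exactly that column i has no zero in the first n rows
theorem pvInnerA (g : List (List Int)) (i : Nat) : ∀ n : Nat,
    ((List.range n).foldl
      (fun (s : Bool × Nat × Nat) j =>
        if (g.getD j []).getD i 0 = 0 then (false, j, s.2.2)
        else (s.1, s.2.1, s.2.2 + 1)) (true, 0, 0)).1
    = decide (pvZc g i n = 0) := by
  intro n
  induction n with
  | zero => simp [pvZc]
  | succ n ih =>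
    rw [List.range_succ, List.foldl_append, List.foldl_cons, List.foldl_nil, pvZc_succ]
    by_cases h : (g.getD n []).getD i 0 = 0
    · rw [if_pos h, if_pos h]
      simp
    · rw [if_neg h, if_neg h, Nat.add_zero]
      exact ih

-- B's inner sweep over one row, on a table at least cols long: it bumps exactly
-- the zero positions of the row and preserves the table length
theorem pvInnerB (row : List Int) (j : Nat) : ∀ (c : Nat) (t : List Nat × List Nat),
    c ≤ t.1.length →
    (((List.range c).foldl
        (fun (t : List Nat × List Nat) i =>
          if row.getD i 0 = 0 then (t.1.set i (t.1.getD i 0 + 1), t.2.set i j)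
          else t) t).1.length = t.1.length
     ∧ ∀ i : Nat,
        ((List.range c).foldl
          (fun (t : List Nat × List Nat) i =>
            if row.getD i 0 = 0 then (t.1.set i (t.1.getD i 0 + 1), t.2.set i j)
            else t) t).1.getD i 0
        = if i < c ∧ row.getD i 0 = 0 then t.1.getD i 0 + 1 else t.1.getD i 0) := by
  intro c
  induction c with
  | zero =>
    intro t _
    refine ⟨rfl, fun i => ?_⟩
    have : ¬ (i < 0 ∧ row.getD i 0 = 0) := by omega
    rw [if_neg this]
    rfl
  | succ c ih =>
    intro t hc
    obtain ⟨ihlen, ihget⟩ := ih t (Nat.le_of_succ_le hc)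
    rw [List.range_succ, List.foldl_append, List.foldl_cons, List.foldl_nil]
    by_cases h : row.getD c 0 = 0
    · rw [if_pos h]
      refine ⟨by rw [List.length_set, ihlen], fun i => ?_⟩
      rw [pvGetD_set, ihlen]
      rcases eq_or_ne c i with rfl | hne
      · have hnotc : ¬ (c < c ∧ row.getD c 0 = 0) := by omega
        rw [if_pos ⟨rfl, hc⟩, ihget, if_neg hnotc, if_pos ⟨Nat.lt_succ_self c, h⟩]
      · have : ¬ (c = i ∧ c < t.1.length) := fun hcontra => hne hcontra.1
        rw [if_neg this, ihget]
        have hiff : (i < c + 1 ∧ row.getD i 0 = 0) ↔ (i < c ∧ row.getD i 0 = 0) := by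
          constructor
          · rintro ⟨hi, hz⟩
            exact ⟨by omega, hz⟩
          · rintro ⟨hi, hz⟩
            exact ⟨Nat.lt_succ_of_lt hi, hz⟩
        rw [if_congr hiff rfl rfl]
    · rw [if_neg h]
      refine ⟨ihlen, fun i => ?_⟩
      rw [ihget]
      have hiff : (i < c + 1 ∧ row.getD i 0 = 0) ↔ (i < c ∧ row.getD i 0 = 0) := by
        constructor
        · rintro ⟨hi, hz⟩
          rcases Nat.lt_succ_iff_lt_or_eq.mp hi with h' | h'
          · exact ⟨h', hz⟩
          · exact absurd (h' ▸ hz) h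
        · rintro ⟨hi, hz⟩
          exact ⟨Nat.lt_succ_of_lt hi, hz⟩
      rw [if_congr hiff rfl rfl]

-- B's table after sweeping the first n rows holds the column zero-counts
theorem pvOuterB (g : List (List Int)) (cols : Nat) : ∀ n : Nat,
    (((List.range n).foldl
        (fun (t : List Nat × List Nat) j =>
          (List.range cols).foldl
            (fun (t : List Nat × List Nat) i =>
              if (g.getD j []).getD i 0 = 0 then (t.1.set i (t.1.getD i 0 + 1), t.2.set i j)
              else t) t)
        (List.replicate cols 0, List.replicate cols 0)).1.length = cols
     ∧ ∀ i : Nat, i < cols →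
        ((List.range n).foldl
          (fun (t : List Nat × List Nat) j =>
            (List.range cols).foldl
              (fun (t : List Nat × List Nat) i =>
                if (g.getD j []).getD i 0 = 0 then (t.1.set i (t.1.getD i 0 + 1), t.2.set i j)
                else t) t)
          (List.replicate cols 0, List.replicate cols 0)).1.getD i 0
        = pvZc g i n) := by
  intro n
  induction n with
  | zero =>
    refine ⟨by simp, fun i hi => ?_⟩
    simp [pvZc, List.getD, hi]
  | succ n ih =>
    obtain ⟨ihlen, ihget⟩ := ih
    rw [List.range_succ, List.foldl_append, List.foldl_cons, List.foldl_nil]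
    obtain ⟨blen, bget⟩ := pvInnerB (g.getD n []) n cols _ (Nat.le_of_eq ihlen.symm)
    refine ⟨by rw [blen, ihlen], fun i hi => ?_⟩
    rw [bget i, pvZc_succ]
    by_cases h : (g.getD n []).getD i 0 = 0
    · rw [if_pos ⟨hi, h⟩, if_pos h, ihget i hi]
    · have : ¬ (i < cols ∧ (g.getD n []).getD i 0 = 0) := fun hcontra => h hcontra.2
      rw [if_neg this, if_neg h, Nat.add_zero, ihget i hi]

theorem izracunaj_eq (grid_ver : List (List Int)) (column_to_check : List (Int × Int)) :
    izracunaj grid_ver column_to_check = izracunaj_alt grid_ver column_to_check := by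
  unfold izracunaj izracunaj_alt
  apply PySem.List.foldl_congr_mem
  intro acc i hi
  dsimp only
  have hi' : i < (grid_ver.getD 0 []).length := List.mem_range.mp hi
  obtain ⟨_, bget⟩ := pvOuterB grid_ver (grid_ver.getD 0 []).length grid_ver.length
  rw [pvInnerA grid_ver i grid_ver.length, bget i hi']
  by_cases h : pvZc grid_ver i grid_ver.length = 0 <;> simp [h]

-- ===== VERDICT (by name: the statement is the Claim_ definition above) =====
theorem izracunaj_spec : Claim_equal_izracunaj := by
  intro g cc _ _
  exact izracunaj_eq g cc
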